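-- pv_equiv track=rewrite | github.com/miliar/Code_Jam_Webscraper | Solutions_python/Problem_201/167.py | floor_weird
-- ===== SOURCE A (Python) =====
-- def floor_weird(n):
--     """
--     Returns the largest integer of form 2^k-1 that is < n. Assumes n >= 1.
--     Awful implementation. Awful runtime.
--     """
--     ans = 2
--     while ans < n:
--         ans *= 2
--     trial = ans - 1
--     if trial < n:
--         ans = trial
--     else:
--         ans = (ans // 2) - 1
--     return ans
-- ===== SOURCE B (Python) =====
-- def floor_weird(n):
--     """Largest integer of form 2^k-1 that is < n (assumes n >= 1); closed form via bit_length."""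
--     if n <= 1:
--         return 0
--     return (1 << (n.bit_length() - 1)) - 1
-- ===== Notes on version B (the rewrite author's own statement) =====
-- stated objective: simpler
-- what changed: Replaced the doubling loop plus trial/branch with the closed form (1 << (n.bit_length()-1)) - 1 (0 for n <= 1), computed directly from n's bit length.
import Mathlib
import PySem

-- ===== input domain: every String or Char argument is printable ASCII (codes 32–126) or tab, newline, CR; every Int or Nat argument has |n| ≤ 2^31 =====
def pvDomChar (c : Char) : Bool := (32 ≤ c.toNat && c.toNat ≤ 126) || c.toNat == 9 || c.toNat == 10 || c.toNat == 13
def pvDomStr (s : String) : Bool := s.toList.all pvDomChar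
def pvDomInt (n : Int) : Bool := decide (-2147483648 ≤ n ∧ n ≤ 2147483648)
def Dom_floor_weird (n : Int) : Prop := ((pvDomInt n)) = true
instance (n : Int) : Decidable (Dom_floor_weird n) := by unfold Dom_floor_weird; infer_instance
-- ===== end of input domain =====

-- B replaces A's doubling loop and trial/branch with the closed form 2^(bit_length(n)-1) - 1 (0 for n ≤ 1): simpler, loop-free.

-- ===== PORT A =====
-- the 'while ans < n: ans *= 2' loop; the '0 < ans' conjunct is a totality guard only
-- (A always starts at ans = 2, where it holds at every iteration)
def floorGo (n ans : Int) : Int :=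
  if _h : 0 < ans ∧ ans < n then floorGo n (ans * 2) else ans
termination_by (n - ans).toNat
decreasing_by omega

def floor_weird (n : Int) : Int :=
  let ans := floorGo n 2
  let trial := ans - 1
  if trial < n then trial else PySem.Int.floordiv ans 2 - 1

-- ===== PORT B =====
def floor_weird_alt (n : Int) : Int :=
  if n ≤ 1 then 0
  else (2 : Int) ^ (PySem.Int.bitLength n - 1) - 1   -- (1 << (n.bit_length()-1)) - 1

-- ===== PRECONDITION & SPEC =====
def Spec_floor_weird (n : Int) (out : Int) : Prop := out = floor_weird_alt n
instance (n : Int) (out : Int) : Decidable (Spec_floor_weird n out) := by unfold Spec_floor_weird; infer_instance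

-- ===== CLAIM (what is proved, stated in full; the proofs are below) =====
def Claim_equal_floor_weird : Prop := ∀ (n : Int), Dom_floor_weird n → Spec_floor_weird n (floor_weird n)

-- ===== LEMMAS AND PROOFS =====

theorem floorGo_stop (n ans : Int) (h : ¬ (0 < ans ∧ ans < n)) : floorGo n ans = ans := by
  rw [floorGo]; exact dif_neg h

theorem floorGo_spec (n ans : Int) (h0 : 0 < ans) (h : ans < n) :
    ∃ k : Nat, floorGo n ans = ans * 2 ^ (k + 1) ∧ n ≤ ans * 2 ^ (k + 1) ∧ ans * 2 ^ k < n := by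
  rw [floorGo, dif_pos ⟨h0, h⟩]
  by_cases h2 : ans * 2 < n
  · obtain ⟨k, hk, hle, hlt⟩ := floorGo_spec n (ans * 2) (by omega) h2
    refine ⟨k + 1, ?_, ?_, ?_⟩
    · rw [hk]; ring
    · have e : ans * 2 ^ (k + 1 + 1) = ans * 2 * 2 ^ (k + 1) := by ring
      omega
    · have e : ans * 2 ^ (k + 1) = ans * 2 * 2 ^ k := by ring
      omega
  · rw [floorGo_stop n (ans * 2) (by omega)]
    exact ⟨0, by ring, by simpa using not_lt.mp h2, by simpa using h⟩
termination_by (n - ans).toNat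
decreasing_by omega

theorem bitLength_eq (n : Int) (j : Nat) (h1 : (2 : Int) ^ j ≤ n) (h2 : n < (2 : Int) ^ (j + 1)) :
    PySem.Int.bitLength n = j + 1 := by
  have hpos : 0 < n := lt_of_lt_of_le (by positivity) h1
  have habs : (n.natAbs : Int) = n := Int.natAbs_of_nonneg hpos.le
  have h1' : 2 ^ j ≤ n.natAbs := by zify; rw [abs_of_nonneg hpos.le]; exact h1
  have h2' : n.natAbs < 2 ^ (j + 1) := by zify; rw [abs_of_nonneg hpos.le]; exact h2
  have hA := PySem.Int.lt_two_pow_bitLength n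
  have hB := PySem.Int.two_pow_bitLength_le n (by omega)
  set b := PySem.Int.bitLength n with hb
  have hb1 : 1 ≤ b := by
    by_contra hc
    interval_cases b
    · simp at hA; omega
  rcases lt_trichotomy (b - 1) j with hlt | heq | hgt
  · have : 2 ^ b ≤ 2 ^ j := Nat.pow_le_pow_right (by norm_num) (by omega)
    omega
  · omega
  · have : 2 ^ (j + 1) ≤ 2 ^ (b - 1) := Nat.pow_le_pow_right (by norm_num) (by omega)
    omega

theorem floor_weird_eq (n : Int) : floor_weird n = floor_weird_alt n := by
  unfold floor_weird floor_weird_alt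
  by_cases hn : n ≤ 2
  · rw [floorGo_stop n 2 (by omega)]
    by_cases h1 : n ≤ 1
    · simp only [show ¬ ((2 : Int) - 1 < n) by omega, if_pos h1]
      decide
    · have hn2 : n = 2 := by omega
      subst hn2
      norm_num
      have : PySem.Int.bitLength 2 = 2 := bitLength_eq 2 1 (by norm_num) (by norm_num)
      rw [this]; norm_num
  · push Not at hn
    obtain ⟨k, hk, hle, hlt⟩ := floorGo_spec n 2 (by norm_num) hn
    rw [hk]
    have e1 : (2 : Int) * 2 ^ (k + 1) = 2 ^ (k + 2) := by ring
    have e0 : (2 : Int) * 2 ^ k = 2 ^ (k + 1) := by ring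
    rw [if_neg (by omega : ¬ n ≤ 1)]
    by_cases ht : 2 * 2 ^ (k + 1) - 1 < n
    · -- n = 2^(k+2)
      have hne : n = (2 : Int) ^ (k + 2) := by omega
      rw [if_pos ht]
      have hbl : PySem.Int.bitLength n = k + 3 :=
        bitLength_eq n (k + 2) (by omega) (by rw [hne]; exact pow_lt_pow_right₀ (by norm_num) (by omega))
      rw [hbl]
      have h31 : k + 3 - 1 = k + 2 := by omega
      rw [h31]; omega
    · rw [if_neg ht]
      have hbl : PySem.Int.bitLength n = k + 2 :=
        bitLength_eq n (k + 1) (by omega) (by omega)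
      rw [hbl]
      have h21 : k + 2 - 1 = k + 1 := by omega
      rw [h21, PySem.Int.floordiv_eq_ediv_of_pos (by norm_num)]
      rw [Int.mul_ediv_cancel_left _ (by norm_num)]

-- ===== VERDICT (by name: the statement is the Claim_ definition above) =====
theorem floor_weird_spec : Claim_equal_floor_weird := by
  intro n _
  unfold Spec_floor_weird
  exact floor_weird_eq n
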